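-- pv_equiv track=rewrite | github.com/MariaPdg/yandex-training | hw-4B/Python/C-frequencies.py | sort_frequencies
-- ===== SOURCE A (Python) =====
-- def sort_frequencies(dct):
--
--     sorted_by_value = [(k, v) for k, v in sorted(dct.items(), key=lambda x: (x[1]), reverse=True)]
--     dct = {}
--     for item in sorted_by_value:
--         if item[1] not in dct:
--             dct[item[1]] = []
--         dct[item[1]].append(item[0])
--
--     return dct
-- ===== SOURCE B (Python) =====
-- def sort_frequencies(dct):
--     groups = {}
--     for k, v in dct.items():
--         groups.setdefault(v, []).append(k)
--     return dict(sorted(groups.items(), key=lambda x: x[0], reverse=True))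
-- ===== Notes on version B (the rewrite author's own statement) =====
-- stated objective: simpler
-- what changed: A sorts all n items by value first and then groups them; B groups the items in one pass with setdefault and sorts only the grouped (value, keys) entries - one distinct value each - to produce the descending order.
import Mathlib
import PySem

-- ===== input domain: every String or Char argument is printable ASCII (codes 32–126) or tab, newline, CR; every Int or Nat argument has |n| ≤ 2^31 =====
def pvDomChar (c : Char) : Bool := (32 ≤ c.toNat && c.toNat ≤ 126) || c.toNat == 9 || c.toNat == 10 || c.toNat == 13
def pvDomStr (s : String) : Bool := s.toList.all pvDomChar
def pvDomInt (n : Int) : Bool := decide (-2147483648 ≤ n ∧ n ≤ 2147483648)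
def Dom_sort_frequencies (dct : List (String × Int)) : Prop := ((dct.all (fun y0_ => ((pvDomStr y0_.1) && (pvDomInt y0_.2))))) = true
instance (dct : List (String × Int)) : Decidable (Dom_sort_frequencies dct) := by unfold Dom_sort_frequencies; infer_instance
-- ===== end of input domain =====

-- B groups the items in one pass (setdefault) and sorts only the grouped (value, keys) entries,
-- instead of A's sort-all-items-then-group; same return value, simpler decomposition.

-- ===== PORT A =====
def sort_frequencies (dct : List (String × Int)) : List (Int × List String) :=
  -- sorted_by_value = [(k, v) for k, v in sorted(dct.items(), key=lambda x: x[1], reverse=True)]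
  let sorted_by_value := (PySem.List.sorted dct (fun x => x.2) true).map (fun p => (p.1, p.2))
  -- dct = {}; for item in sorted_by_value: if item[1] not in dct: dct[item[1]] = []; dct[item[1]].append(item[0])
  let d := sorted_by_value.foldl
    (fun (d : PySem.Dict Int (List String)) item =>
      let d := if d.contains item.2 then d else d.insert item.2 []
      d.modify item.2 [] (fun t => t ++ [item.1]))
    PySem.Dict.empty
  d.items

-- ===== PORT B =====
def sort_frequencies_alt (dct : List (String × Int)) : List (Int × List String) :=
  -- groups = {}; for k, v in dct.items(): groups.setdefault(v, []).append(k)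
  let groups := dct.foldl
    (fun (d : PySem.Dict Int (List String)) p =>
      (d.setdefault p.2 []).modify p.2 [] (fun t => t ++ [p.1]))
    PySem.Dict.empty
  -- return dict(sorted(groups.items(), key=lambda x: x[0], reverse=True))
  (PySem.Dict.ofList (PySem.List.sorted groups.items (fun x => x.1) true)).items

-- ===== PRECONDITION & SPEC =====
def Spec_sort_frequencies (dct : List (String × Int)) (out : List (Int × List String)) : Prop := out = sort_frequencies_alt dct
instance (dct : List (String × Int)) (out : List (Int × List String)) : Decidable (Spec_sort_frequencies dct out) := by unfold Spec_sort_frequencies; infer_instance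

-- ===== CLAIM (what is proved, stated in full; the proofs are below) =====
def Claim_equal_sort_frequencies : Prop := ∀ (dct : List (String × Int)), Dom_sort_frequencies dct → Spec_sort_frequencies dct (sort_frequencies dct)

-- ===== LEMMAS AND PROOFS =====

-- the common grouping loop: value ↦ its keys, in traversal order
def grp (l : List (String × Int)) : PySem.Dict Int (List String) :=
  l.foldl (fun d p => d.modify p.2 [] (fun t => t ++ [p.1])) PySem.Dict.empty

lemma stepA_eq (d : PySem.Dict Int (List String)) (k : Int) (x : String) :
    (if d.contains k then d else d.insert k []).modify k [] (fun t => t ++ [x])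
      = d.modify k [] (fun t => t ++ [x]) := by
  by_cases h : d.contains k
  · simp [h]
  · simp only [Bool.not_eq_true] at h
    simp [h, PySem.Dict.modify, PySem.Dict.getD_insert_self, PySem.Dict.insert_insert_self,
      PySem.Dict.getD_of_not_contains d ([] : List String) h]

lemma stepB_eq (d : PySem.Dict Int (List String)) (k : Int) (x : String) :
    (d.setdefault k []).modify k [] (fun t => t ++ [x])
      = d.modify k [] (fun t => t ++ [x]) := by
  by_cases h : d.contains k
  · rw [PySem.Dict.setdefault_of_contains _ _ h]
  · simp only [Bool.not_eq_true] at h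
    rw [PySem.Dict.setdefault_of_not_contains _ _ h]
    simp [PySem.Dict.modify, PySem.Dict.getD_insert_self, PySem.Dict.insert_insert_self,
      PySem.Dict.getD_of_not_contains d ([] : List String) h]

lemma A_eq_grp (dct : List (String × Int)) :
    sort_frequencies dct = (grp (PySem.List.sorted dct (fun x => x.2) true)).items := by
  unfold sort_frequencies grp
  simp only [Prod.mk.eta, List.map_id', stepA_eq]

lemma B_eq_grp (dct : List (String × Int)) :
    sort_frequencies_alt dct
      = (PySem.Dict.ofList (PySem.List.sorted (grp dct).items (fun x => x.1) true)).items := by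
  unfold sort_frequencies_alt grp
  simp only [stepB_eq]

lemma filt_insertBy (v : Int) (x : String × Int) :
    ∀ ys : List (String × Int), ys.Pairwise (fun a b => b.2 ≤ a.2) →
    (PySem.List.insertBy (fun a b => decide (b.2 < a.2)) x ys).filter (fun y => y.2 == v)
      = if x.2 = v then ys.filter (fun y => y.2 == v) ++ [x]
        else ys.filter (fun y => y.2 == v) := by
  intro ys
  induction ys with
  | nil =>
    intro _
    by_cases hv : x.2 = v <;> simp [PySem.List.insertBy, List.filter, hv]
  | cons y ys ih =>
    intro hp
    by_cases hlt : y.2 < x.2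
    · have hres : PySem.List.insertBy (fun a b => decide (b.2 < a.2)) x (y :: ys) = x :: y :: ys := by
        simp [PySem.List.insertBy, hlt]
      rw [hres]
      have hall : ∀ z ∈ y :: ys, z.2 < x.2 := by
        intro z hz
        rcases List.mem_cons.mp hz with h | h
        · subst h; exact hlt
        · exact lt_of_le_of_lt (List.rel_of_pairwise_cons hp h) hlt
      by_cases hv : x.2 = v
      · have hnone : (y :: ys).filter (fun y => y.2 == v) = [] := by
          rw [List.filter_eq_nil_iff]
          intro z hz
          simp only [beq_iff_eq]
          exact ne_of_lt (hv ▸ hall z hz)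
        simp [hv, hnone]
      · simp [hv, List.filter_cons]
    · have hres : PySem.List.insertBy (fun a b => decide (b.2 < a.2)) x (y :: ys)
          = y :: PySem.List.insertBy (fun a b => decide (b.2 < a.2)) x ys := by
        simp [PySem.List.insertBy, hlt]
      rw [hres]
      rw [List.filter_cons, List.filter_cons, ih (List.Pairwise.of_cons hp)]
      by_cases hv : x.2 = v <;> by_cases hy : (y.2 == v) = true <;> simp [hv, hy]

lemma filter_sorted_rev (v : Int) (l : List (String × Int)) :
    (PySem.List.sorted l (fun x => x.2) true).filter (fun y => y.2 == v)
      = l.filter (fun y => y.2 == v) := by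
  induction l using List.reverseRecOn with
  | nil => rfl
  | append_singleton l x ih =>
    rw [PySem.List.sorted_rev_eq_foldl_insertBy, List.foldl_append, List.foldl_cons, List.foldl_nil,
      ← PySem.List.sorted_rev_eq_foldl_insertBy,
      filt_insertBy v x _ (PySem.List.sorted_pairwise_rev l (fun x => x.2)), List.filter_append]
    by_cases hv : x.2 = v <;> simp [hv, ih]

lemma items_grp (l : List (String × Int)) :
    (grp l).items = (PySem.Set.ofList (l.map (fun p => p.2))).map
      (fun v => (v, (l.filter (fun p => p.2 == v)).map (fun p => p.1))) := by
  have hnd : (grp l).keys.Nodup := by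
    unfold grp
    exact PySem.Dict.nodup_keys_foldl_modify_key l (fun p => p.2) [] (fun _ p => fun t => t ++ [p.1])
      PySem.Dict.empty (by rw [PySem.Dict.keys_empty]; exact List.nodup_nil)
  have hkeys : (grp l).keys = PySem.Set.ofList (l.map (fun p => p.2)) := by
    unfold grp
    rw [PySem.Dict.keys_foldl_modify_key l (fun p => p.2) [] (fun _ p => fun t => t ++ [p.1])]
    rw [PySem.Dict.keys_empty]
    rfl
  have hgetD : ∀ v, (grp l).getD v [] = (l.filter (fun p => p.2 == v)).map (fun p => p.1) := by
    intro v
    unfold grp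
    have hswap : (List.foldl (fun d p => d.modify p.2 [] (fun t => t ++ [p.1])) PySem.Dict.empty l)
        = (List.foldl (fun d q => d.modify q.1 [] (fun t => t ++ [q.2])) PySem.Dict.empty
            (l.map (fun p => (p.2, p.1)))) := by
      rw [List.foldl_map]
    rw [hswap, PySem.Dict.getD_foldl_modify_append]
    simp [List.filter_map, Function.comp_def, List.map_map, PySem.Dict.getD_empty]
  rw [PySem.Dict.items_eq_map_keys _ hnd [], hkeys]
  exact List.map_congr_left (fun v _ => by rw [hgetD])

lemma update_sublist {α : Type} [BEq α] :
    ∀ (xs s : List α), List.Sublist (PySem.Set.update s xs) (s ++ xs) := by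
  intro xs
  induction xs with
  | nil => intro s; simp [PySem.Set.update]
  | cons x xs ih =>
    intro s
    have hstep : PySem.Set.update s (x :: xs) = PySem.Set.update (PySem.Set.add s x) xs := by
      simp [PySem.Set.update]
    rw [hstep]
    by_cases h : s.contains x = true
    · have hadd : PySem.Set.add s x = s := by simp [PySem.Set.add, h]
      rw [hadd]
      exact (ih s).trans ((List.sublist_cons_self x xs).append_left s)
    · have hadd : PySem.Set.add s x = s ++ [x] := by simp [PySem.Set.add, h]
      rw [hadd]
      exact (ih (s ++ [x])).trans (by simp)

lemma ofList_sublist {α : Type} [BEq α] (xs : List α) : List.Sublist (PySem.Set.ofList xs) xs := by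
  have := update_sublist xs ([] : List α)
  simpa [PySem.Set.ofList, PySem.Set.update, PySem.Set.empty] using this

lemma pairwise_gt_ofList (xs : List Int) (h : xs.Pairwise (fun a b => b ≤ a)) :
    (PySem.Set.ofList xs : List Int).Pairwise (fun a b => b < a) := by
  have h1 : (PySem.Set.ofList xs : List Int).Pairwise (fun a b => b ≤ a) :=
    List.Pairwise.sublist (ofList_sublist xs) h
  have h2 : (PySem.Set.ofList xs : List Int).Pairwise (fun a b => a ≠ b) :=
    PySem.Set.nodup_ofList xs
  exact (h1.and h2).imp (fun hab => lt_of_le_of_ne hab.1 (Ne.symm hab.2))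

lemma items_ofList_nodup (xs : List (Int × List String)) (h : (xs.map (fun p => p.1)).Nodup) :
    (PySem.Dict.ofList xs).items = xs := by
  have := PySem.Dict.items_foldl_insert_fresh xs (fun p => p.1) (fun p => p.2) PySem.Dict.empty
    (fun a _ => PySem.Dict.contains_empty _) h
  simpa [PySem.Dict.ofList, PySem.Dict.update, PySem.Dict.empty] using this

lemma main_eq (dct : List (String × Int)) : sort_frequencies dct = sort_frequencies_alt dct := by
  rw [A_eq_grp, B_eq_grp, items_grp, items_grp]
  have hpay : ∀ v : Int,
      (((PySem.List.sorted dct (fun x => x.2) true).filter (fun p => p.2 == v)).map (fun p => p.1))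
        = ((dct.filter (fun p => p.2 == v)).map (fun p => p.1)) := by
    intro v; rw [filter_sorted_rev]
  have hL : (PySem.Set.ofList ((PySem.List.sorted dct (fun x => x.2) true).map (fun p => p.2))).map
        (fun v => (v, ((PySem.List.sorted dct (fun x => x.2) true).filter (fun p => p.2 == v)).map (fun p => p.1)))
      = (PySem.Set.ofList ((PySem.List.sorted dct (fun x => x.2) true).map (fun p => p.2))).map
        (fun v => (v, (dct.filter (fun p => p.2 == v)).map (fun p => p.1))) :=
    List.map_congr_left (fun v _ => by rw [hpay])
  rw [hL]
  set F : Int → Int × List String := fun v => (v, (dct.filter (fun p => p.2 == v)).map (fun p => p.1)) with hF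
  set ks : List Int := PySem.Set.ofList ((PySem.List.sorted dct (fun x => x.2) true).map (fun p => p.2)) with hks
  have hkperm : (ks : List Int).Perm (PySem.Set.ofList (dct.map (fun p => p.2))) := by
    apply List.perm_of_nodup_nodup_toFinset_eq
    · exact PySem.Set.nodup_ofList _
    · exact PySem.Set.nodup_ofList _
    · ext a
      simp [hks, PySem.Set.mem_ofList, PySem.List.mem_sorted]
  have hperm : (ks.map F).Perm ((PySem.Set.ofList (dct.map (fun p => p.2)) : List Int).map F) :=
    hkperm.map F
  have hpw : (ks.map F).Pairwise (fun a b => b.1 < a.1) := by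
    rw [List.pairwise_map]
    have : (ks : List Int).Pairwise (fun a b => b < a) := by
      apply pairwise_gt_ofList
      rw [List.pairwise_map]
      exact PySem.List.sorted_pairwise_rev dct (fun x => x.2)
    exact this.imp (fun hab => by simpa [hF] using hab)
  rw [PySem.List.sorted_rev_eq_of_perm_of_pairwise_gt _ (ks.map F) (fun x => x.1) hperm hpw]
  rw [items_ofList_nodup]
  simp only [List.map_map]
  have : ((fun p : Int × List String => p.1) ∘ F) = id := by funext v; simp [hF]
  rw [this, List.map_id]
  exact PySem.Set.nodup_ofList _

-- ===== VERDICT (by name: the statement is the Claim_ definition above) =====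
theorem sort_frequencies_spec : Claim_equal_sort_frequencies := by
  intro dct _
  unfold Spec_sort_frequencies
  exact main_eq dct
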